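-- pv_equiv track=rewrite | github.com/AkuraDiary/asdf | src/line_detection.py | structure_text
-- ===== SOURCE A (Python) =====
-- def structure_text(words, space_threshold=15, vertical_threshold=1):
--     """Converts bounding box data into a readable format for later processing."""
--     structured_text = []
--
--     for line in words:
--         word_images = []
--         current_cluster = []  # To hold words that should be merged together
--         for i, (x, y, w, h) in enumerate(sorted(line, key=lambda b: b[0])):  # Sort words by x coordinate
--             if not current_cluster:
--                 current_cluster.append((x, y, w, h))  # Add the first word to the cluster
--             else:
--                 prev_x, prev_y, prev_w, prev_h = current_cluster[-1]
--                 if x - (prev_x + prev_w) <= space_threshold: #and y - (prev_y + prev_h) < vertical_threshold:  # Merge if space is small enough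
--                     # Merge the bounding boxes by extending the width of the current cluster
--                     new_x = min(prev_x, x)
--                     new_y = min(prev_y, y)
--                     new_w = max(prev_x + prev_w, x + w) - new_x
--                     new_h = max(prev_y + prev_h, y + h) - new_y
--                     current_cluster[-1] = (new_x, new_y, new_w, new_h)
--                 else:
--                     # If the gap is too large, finalize the current cluster and start a new one
--                     word_images.append(current_cluster[-1])
--                     current_cluster = [(x, y, w, h)]  # Start a new cluster
--
--         if current_cluster:  # Don't forget to add the last cluster
--             word_images.append(current_cluster[-1])
--
--         structured_text.append(word_images)
--
--     return structured_text
-- ===== SOURCE B (Python) =====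
-- def structure_text(words, space_threshold=15, vertical_threshold=1):
--     """Two-pass version: first split each sorted line into runs of horizontally
--     close words (tracking the running right edge), then reduce each run to its
--     bounding box."""
--
--     def _bbox(run):
--         x0, y0, w0, h0 = run[0]
--         lx, ty, rx, by = x0, y0, x0 + w0, y0 + h0
--         for (x, y, w, h) in run[1:]:
--             lx = min(lx, x)
--             ty = min(ty, y)
--             rx = max(rx, x + w)
--             by = max(by, y + h)
--         return (lx, ty, rx - lx, by - ty)
--
--     structured_text = []
--     for line in words:
--         runs = []
--         cur = []
--         right = 0
--         for box in sorted(line, key=lambda b: b[0]):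
--             x, y, w, h = box
--             if cur and x - right <= space_threshold:
--                 cur.append(box)
--                 right = max(right, x + w)
--             else:
--                 if cur:
--                     runs.append(cur)
--                 cur = [box]
--                 right = x + w
--         if cur:
--             runs.append(cur)
--         structured_text.append([_bbox(r) for r in runs])
--     return structured_text
-- ===== Notes on version B (the rewrite author's own statement) =====
-- stated objective: alternative
-- what changed: Instead of eagerly merging each new word into the last cluster's bounding box, B first partitions each sorted line into runs of horizontally close words using a running right edge, then reduces each run to its bounding box in a second pass.
import Mathlib
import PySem

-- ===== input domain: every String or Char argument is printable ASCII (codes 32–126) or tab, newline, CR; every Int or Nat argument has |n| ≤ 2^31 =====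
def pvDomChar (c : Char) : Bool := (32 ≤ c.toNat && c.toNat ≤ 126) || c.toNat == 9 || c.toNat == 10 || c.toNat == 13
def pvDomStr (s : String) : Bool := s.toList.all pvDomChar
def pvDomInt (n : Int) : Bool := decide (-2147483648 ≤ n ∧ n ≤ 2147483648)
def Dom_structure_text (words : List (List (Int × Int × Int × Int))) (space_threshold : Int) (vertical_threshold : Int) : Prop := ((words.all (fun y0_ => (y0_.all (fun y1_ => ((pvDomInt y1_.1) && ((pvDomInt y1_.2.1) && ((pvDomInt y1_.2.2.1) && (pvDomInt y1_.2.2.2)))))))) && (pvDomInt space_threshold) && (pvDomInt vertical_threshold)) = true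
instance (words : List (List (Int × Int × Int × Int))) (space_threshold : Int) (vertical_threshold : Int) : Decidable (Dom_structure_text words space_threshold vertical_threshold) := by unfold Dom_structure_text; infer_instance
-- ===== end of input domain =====

-- B replaces A's eager merge-into-the-last-cluster-box loop by a partition pass into
-- runs of horizontally close words (tracking a running right edge) followed by a
-- second pass reducing each run to its bounding box; alternative decomposition, same cost.

-- ===== PORT A =====
-- one step of A's inner loop; state = (word_images, current_cluster)
def stepA (space_threshold : Int)
    (s : List (Int × Int × Int × Int) × List (Int × Int × Int × Int))
    (b : Int × Int × Int × Int) :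
    List (Int × Int × Int × Int) × List (Int × Int × Int × Int) :=
  match s, b with
  | (word_images, current_cluster), (x, y, w, h) =>
    match current_cluster.getLast? with
    | none => (word_images, current_cluster ++ [(x, y, w, h)])
    | some (prev_x, prev_y, prev_w, prev_h) =>
      if x - (prev_x + prev_w) ≤ space_threshold then
        -- current_cluster[-1] = merged box
        (word_images, current_cluster.dropLast ++
          [(min prev_x x, min prev_y y,
            max (prev_x + prev_w) (x + w) - min prev_x x,
            max (prev_y + prev_h) (y + h) - min prev_y y)])
      else
        (word_images ++ [(prev_x, prev_y, prev_w, prev_h)], [(x, y, w, h)])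

def lineA (space_threshold : Int) (line : List (Int × Int × Int × Int)) :
    List (Int × Int × Int × Int) :=
  let s := (PySem.List.sorted line (fun b => b.1) false).foldl (stepA space_threshold) ([], [])
  match s.2.getLast? with
  | none => s.1
  | some last => s.1 ++ [last]

def structure_text (words : List (List (Int × Int × Int × Int))) (space_threshold : Int) (vertical_threshold : Int) : List (List (Int × Int × Int × Int)) :=
  words.map (lineA space_threshold)

-- ===== PORT B =====
-- _bbox's loop state (lx, ty, rx, by)
def bboxStep (s : Int × Int × Int × Int) (b : Int × Int × Int × Int) :
    Int × Int × Int × Int :=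
  (min s.1 b.1, min s.2.1 b.2.1, max s.2.2.1 (b.1 + b.2.2.1), max s.2.2.2 (b.2.1 + b.2.2.2))

-- Source B's _bbox; runs are always nonempty, the [] case is unreachable
def bbox (run : List (Int × Int × Int × Int)) : Int × Int × Int × Int :=
  match run with
  | [] => (0, 0, 0, 0)
  | (x0, y0, w0, h0) :: rest =>
    let s := rest.foldl bboxStep (x0, y0, x0 + w0, y0 + h0)
    (s.1, s.2.1, s.2.2.1 - s.1, s.2.2.2 - s.2.1)

-- one step of B's partition loop; state = (runs, cur, right)
def stepB (space_threshold : Int)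
    (s : List (List (Int × Int × Int × Int)) × List (Int × Int × Int × Int) × Int)
    (b : Int × Int × Int × Int) :
    List (List (Int × Int × Int × Int)) × List (Int × Int × Int × Int) × Int :=
  match s, b with
  | (runs, cur, right), (x, y, w, h) =>
    if !cur.isEmpty && decide (x - right ≤ space_threshold) then
      (runs, cur ++ [(x, y, w, h)], max right (x + w))
    else
      ((if cur.isEmpty then runs else runs ++ [cur]), [(x, y, w, h)], x + w)

def lineB (space_threshold : Int) (line : List (Int × Int × Int × Int)) :
    List (Int × Int × Int × Int) :=
  let s := (PySem.List.sorted line (fun b => b.1) false).foldl (stepB space_threshold) ([], [], 0)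
  (if s.2.1.isEmpty then s.1 else s.1 ++ [s.2.1]).map bbox

def structure_text_alt (words : List (List (Int × Int × Int × Int))) (space_threshold : Int) (vertical_threshold : Int) : List (List (Int × Int × Int × Int)) :=
  words.map (lineB space_threshold)

-- ===== PRECONDITION & SPEC =====
def Spec_structure_text (words : List (List (Int × Int × Int × Int))) (space_threshold : Int) (vertical_threshold : Int) (out : List (List (Int × Int × Int × Int))) : Prop := out = structure_text_alt words space_threshold vertical_threshold
instance (words : List (List (Int × Int × Int × Int))) (space_threshold : Int) (vertical_threshold : Int) (out : List (List (Int × Int × Int × Int))) : Decidable (Spec_structure_text words space_threshold vertical_threshold out) := by unfold Spec_structure_text; infer_instance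

-- ===== CLAIM (what is proved, stated in full; the proofs are below) =====
def Claim_equal_structure_text : Prop := ∀ (words : List (List (Int × Int × Int × Int))) (space_threshold : Int) (vertical_threshold : Int), Dom_structure_text words space_threshold vertical_threshold → Spec_structure_text words space_threshold vertical_threshold (structure_text words space_threshold vertical_threshold)

-- ===== LEMMAS AND PROOFS =====

-- bbox of a singleton run is the box itself
theorem bbox_singleton (b : Int × Int × Int × Int) : bbox [b] = b := by
  obtain ⟨x, y, w, h⟩ := b
  simp [bbox]

-- appending a box to a nonempty run updates its bbox by A's merge formula
theorem bbox_append (run : List (Int × Int × Int × Int)) (hne : run ≠ [])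
    (b : Int × Int × Int × Int) :
    bbox (run ++ [b]) =
      (min (bbox run).1 b.1, min (bbox run).2.1 b.2.1,
       max ((bbox run).1 + (bbox run).2.2.1) (b.1 + b.2.2.1) - min (bbox run).1 b.1,
       max ((bbox run).2.1 + (bbox run).2.2.2) (b.2.1 + b.2.2.2) - min (bbox run).2.1 b.2.1) := by
  match run with
  | [] => exact absurd rfl hne
  | (x0, y0, w0, h0) :: rest =>
    obtain ⟨x, y, w, h⟩ := b
    simp [bbox, List.foldl_append, bboxStep]

-- the running right edge B maintains equals the right edge of the run's bbox
-- (folded into the invariant below)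

-- invariant linking A's fold state to B's fold state, preserved along any list
theorem fold_inv (st : Int) (l : List (Int × Int × Int × Int))
    (wi cc : List (Int × Int × Int × Int))
    (runs : List (List (Int × Int × Int × Int))) (cur : List (Int × Int × Int × Int))
    (right : Int)
    (h1 : wi = runs.map bbox)
    (h2 : cc = if cur.isEmpty then [] else [bbox cur])
    (h3 : cur ≠ [] → right = (bbox cur).1 + (bbox cur).2.2.1) :
    (l.foldl (stepA st) (wi, cc)).1 = (l.foldl (stepB st) (runs, cur, right)).1.map bbox ∧
    (l.foldl (stepA st) (wi, cc)).2 =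
      (if (l.foldl (stepB st) (runs, cur, right)).2.1.isEmpty then []
       else [bbox (l.foldl (stepB st) (runs, cur, right)).2.1]) ∧
    ((l.foldl (stepB st) (runs, cur, right)).2.1 ≠ [] →
      (l.foldl (stepB st) (runs, cur, right)).2.2 =
        (bbox (l.foldl (stepB st) (runs, cur, right)).2.1).1 +
        (bbox (l.foldl (stepB st) (runs, cur, right)).2.1).2.2.1) := by
  induction l generalizing wi cc runs cur right with
  | nil =>
    subst h1 h2
    exact ⟨rfl, rfl, h3⟩
  | cons b t ih =>
    obtain ⟨x, y, w, h⟩ := b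
    simp only [List.foldl_cons]
    by_cases hcur : cur = []
    · subst hcur
      -- A appends first box; B starts the first run
      have hA : stepA st (wi, cc) (x, y, w, h) = (wi, [(x, y, w, h)]) := by
        subst h2; simp [stepA]
      have hB : stepB st (runs, [], right) (x, y, w, h) = (runs, [(x, y, w, h)], x + w) := by
        simp [stepB]
      rw [hA, hB]
      exact ih _ _ _ _ _ h1 (by simp [bbox_singleton]) (by simp [bbox_singleton])
    · have hccne : ¬ cur.isEmpty := by simpa [List.isEmpty_iff] using hcur
      have hcc : cc = [bbox cur] := by simp [h2, List.isEmpty_iff, hcur]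
      have hright := h3 hcur
      by_cases hgap : x - right ≤ st
      · -- merge: A folds the box into the cluster box, B extends the run
        have hA : stepA st (wi, cc) (x, y, w, h) =
            (wi, [(min (bbox cur).1 x, min (bbox cur).2.1 y,
                   max ((bbox cur).1 + (bbox cur).2.2.1) (x + w) - min (bbox cur).1 x,
                   max ((bbox cur).2.1 + (bbox cur).2.2.2) (y + h) - min (bbox cur).2.1 y)]) := by
          rw [hcc]
          simp only [stepA, List.getLast?_singleton]
          rw [← hright]
          simp [hgap]
        have hB : stepB st (runs, cur, right) (x, y, w, h) =
            (runs, cur ++ [(x, y, w, h)], max right (x + w)) := by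
          simp [stepB, hccne, hgap]
        rw [hA, hB]
        refine ih _ _ _ _ _ h1 ?_ ?_
        · simp [bbox_append cur hcur]
        · intro _
          rw [bbox_append cur hcur]
          simp [hright]
      · -- gap too large: A finalizes the cluster box, B finalizes the run
        have hA : stepA st (wi, cc) (x, y, w, h) =
            (wi ++ [bbox cur], [(x, y, w, h)]) := by
          rw [hcc]
          simp only [stepA, List.getLast?_singleton]
          rw [← hright]
          simp [hgap]
        have hB : stepB st (runs, cur, right) (x, y, w, h) =
            (runs ++ [cur], [(x, y, w, h)], x + w) := by
          simp [stepB, hccne, hgap]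
        rw [hA, hB]
        exact ih _ _ _ _ _ (by simp [h1]) (by simp [bbox_singleton]) (by simp [bbox_singleton])

-- per-line agreement
theorem lineA_eq_lineB (st : Int) (line : List (Int × Int × Int × Int)) :
    lineA st line = lineB st line := by
  obtain ⟨e1, e2, -⟩ := fold_inv st (PySem.List.sorted line (fun b => b.1) false)
    [] [] [] [] 0 rfl rfl (by simp)
  unfold lineA lineB
  set s := (PySem.List.sorted line (fun b => b.1) false).foldl (stepB st) ([], [], 0) with hs
  by_cases hc : s.2.1 = []
  · simp only [e1, e2, hc, List.isEmpty_nil, if_true, List.getLast?_nil]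
  · have : (if s.2.1.isEmpty then ([] : List (Int × Int × Int × Int)) else [bbox s.2.1]) = [bbox s.2.1] := by
      simp [List.isEmpty_iff, hc]
    simp only [e1, e2, this, List.getLast?_singleton]
    simp [List.isEmpty_iff, hc]

-- ===== VERDICT (by name: the statement is the Claim_ definition above) =====
theorem structure_text_spec : Claim_equal_structure_text := by
  intro words st vt _
  unfold Spec_structure_text structure_text structure_text_alt
  exact List.map_congr_left (fun line _ => lineA_eq_lineB st line)
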